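-- pv_equiv track=rewrite | github.com/yarmash/codejam | 2016/1B/problem_a.py | gen_words
-- ===== SOURCE A (Python) =====
-- def gen_words(words):
--     """Yield words in the order that they contain unique character(s)."""
--
--     words = list(words)
--
--     while words:
--         for word in words:
--             if set(word).difference(*[w for w in words if w != word]):
--                 yield word
--                 words.remove(word)
--                 break
-- ===== SOURCE B (Python) =====
-- def gen_words(words):
--     """Yield words in the order that they contain unique character(s).
--
--     Instead of rebuilding, per candidate word, the character sets of all other
--     words (A's inner passes), build ONE counter per round: how many distinct
--     remaining word values contain each character.  A word is ready exactly
--     when one of its characters has count 1.  Where no word is ready, A loops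
--     forever; this implementation simply stops yielding.
--     """
--     words = list(words)
--     while words:
--         counts = {}
--         for w in dict.fromkeys(words):
--             for c in dict.fromkeys(w):
--                 counts[c] = counts.get(c, 0) + 1
--         for i, w in enumerate(words):
--             if any(counts.get(c) == 1 for c in dict.fromkeys(w)):
--                 del words[i]
--                 yield w
--                 break
--         else:
--             return
-- ===== Notes on version B (the rewrite author's own statement) =====
-- stated objective: alternative
-- what changed: Instead of computing, for every candidate word, a set difference against the characters of all other remaining words (two nested passes per candidate), B builds one character->distinct-word-count dictionary per round and tests each word by O(|word|) dictionary lookups; where A's while loop never terminates (no remaining word has a unique character) B simply stops yielding.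
import Mathlib
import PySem

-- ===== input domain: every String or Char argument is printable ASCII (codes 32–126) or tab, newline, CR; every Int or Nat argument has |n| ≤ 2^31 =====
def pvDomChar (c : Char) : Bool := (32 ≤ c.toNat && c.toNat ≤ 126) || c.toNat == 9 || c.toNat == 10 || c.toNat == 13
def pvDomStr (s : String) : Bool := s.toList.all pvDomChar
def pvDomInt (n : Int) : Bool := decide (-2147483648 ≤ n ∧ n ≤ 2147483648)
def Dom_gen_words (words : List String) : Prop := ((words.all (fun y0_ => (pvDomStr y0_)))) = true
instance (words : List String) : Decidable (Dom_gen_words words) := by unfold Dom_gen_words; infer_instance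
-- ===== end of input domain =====

-- B replaces A's per-candidate set differences against all other words with one
-- per-round character counter over the distinct remaining words.  Where at some stage
-- no remaining word has a unique character the Python A loops forever (it never
-- returns); both ports return the words yielded up to that point, and Python B
-- simply stops yielding there.

-- ===== PORT A =====
-- set(word).difference(*[w for w in words if w != word])
def pvUniqA (word : String) (others : List String) : PySem.Set Char :=
  others.foldl (fun s w => PySem.Set.diff s w.toList) (PySem.Set.ofList word.toList)

-- the for-scan: first word whose unique-character set is non-empty (truthy)
def pvReadyA (ws : List String) (word : String) : Bool :=
  pvUniqA word (ws.filter (fun w => w != word)) != []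

def pvLoopA : Nat → List String → List String
  | 0, _ => []
  | fuel + 1, ws =>
    if ws.isEmpty then []
    else
      match ws.find? (pvReadyA ws) with
      | some word =>
        match PySem.List.remove? ws word with
        | some rest => word :: pvLoopA fuel rest
        | none => []          -- unreachable: the found word is a member
      | none => []            -- Python A loops forever here (yields nothing more)

def gen_words (words : List String) : List String := pvLoopA words.length words

-- ===== PORT B =====
-- counts[c] = number of distinct remaining word values containing c
def pvCounts (ws : List String) : PySem.Dict Char Int :=
  (PySem.List.dedup ws).foldl
    (fun d w => (PySem.List.dedup w.toList).foldl (fun d c => d.insert c (d.getD c 0 + 1)) d)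
    PySem.Dict.empty

-- any(counts.get(c) == 1 for c in dict.fromkeys(w))
def pvReadyB (counts : PySem.Dict Char Int) (w : String) : Bool :=
  (PySem.List.dedup w.toList).any (fun c => counts.get? c == some 1)

def pvLoopB : Nat → List String → List String
  | 0, _ => []
  | fuel + 1, ws =>
    if ws.isEmpty then []
    else
      match (PySem.List.enumerate ws 0).find? (fun p => pvReadyB (pvCounts ws) p.2) with
      | some (i, w) => w :: pvLoopB fuel (ws.eraseIdx i.toNat)
      | none => []            -- no word is ready: B stops yielding

def gen_words_alt (words : List String) : List String := pvLoopB words.length words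

-- ===== PRECONDITION & SPEC =====
def Spec_gen_words (words : List String) (out : List String) : Prop := out = gen_words_alt words
instance (words : List String) (out : List String) : Decidable (Spec_gen_words words out) := by unfold Spec_gen_words; infer_instance

-- ===== CLAIM (what is proved, stated in full; the proofs are below) =====
def Claim_equal_gen_words : Prop := ∀ (words : List String), Dom_gen_words words → Spec_gen_words words (gen_words words)

-- ===== LEMMAS AND PROOFS =====

-- membership in A's folded set difference
theorem pv_mem_diff_foldl (others : List String) (s0 : PySem.Set Char) (c : Char) :
    c ∈ others.foldl (fun s w => PySem.Set.diff s w.toList) s0 ↔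
      c ∈ s0 ∧ ∀ v ∈ others, c ∉ v.toList := by
  induction others generalizing s0 with
  | nil => simp
  | cons x xs ih =>
    simp only [List.foldl_cons, ih, PySem.Set.mem_diff, List.mem_cons]
    constructor
    · rintro ⟨⟨hc, hx⟩, h⟩
      exact ⟨hc, by rintro v (rfl | hv); exact hx; exact h v hv⟩
    · rintro ⟨hc, h⟩
      exact ⟨⟨hc, h x (Or.inl rfl)⟩, fun v hv => h v (Or.inr hv)⟩

theorem pv_readyA_iff (ws : List String) (w : String) :
    pvReadyA ws w = true ↔
      ∃ c ∈ w.toList, ∀ v ∈ ws, v ≠ w → c ∉ v.toList := by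
  unfold pvReadyA pvUniqA
  rw [bne_iff_ne, ← List.isEmpty_eq_false_iff, List.isEmpty_eq_false_iff_exists_mem]
  constructor
  · rintro ⟨c, hc⟩
    rw [pv_mem_diff_foldl] at hc
    refine ⟨c, (PySem.Set.mem_ofList _ _).mp hc.1, fun v hv hne => ?_⟩
    exact hc.2 v (List.mem_filter.mpr ⟨hv, by simpa [bne_iff_ne] using hne⟩)
  · rintro ⟨c, hc, h⟩
    refine ⟨c, (pv_mem_diff_foldl _ _ _).mpr ⟨(PySem.Set.mem_ofList _ _).mpr hc, ?_⟩⟩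
    intro v hv
    obtain ⟨hvws, hvne⟩ := List.mem_filter.mp hv
    exact h v hvws (by simpa [bne_iff_ne] using hvne)

-- the counter built by B: getD c 0 = how many distinct remaining values contain c
theorem pv_counts_getD (l : List String) (d : PySem.Dict Char Int) (c : Char) :
    (l.foldl
        (fun d w => (PySem.List.dedup w.toList).foldl (fun d c => d.insert c (d.getD c 0 + 1)) d)
        d).getD c 0
      = d.getD c 0 + (l.countP (fun w => decide (c ∈ w.toList)) : Int) := by
  induction l generalizing d with
  | nil => simp
  | cons w l ih =>
    rw [List.foldl_cons, ih, PySem.Dict.getD_foldl_insert_add_one, List.countP_cons]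
    have hnd : (PySem.List.dedup w.toList).Nodup := PySem.List.nodup_dedup _
    by_cases hc : c ∈ w.toList
    · have h1 : (PySem.List.dedup w.toList).count c = 1 := by
        have hm : c ∈ PySem.List.dedup w.toList := (PySem.List.mem_dedup _ _).mpr hc
        have := (List.nodup_iff_count_le_one.mp hnd) c
        have := List.count_pos_iff.mpr hm
        omega
      rw [h1]
      simp [hc]
      ring
    · have h0 : (PySem.List.dedup w.toList).count c = 0 := by
        rw [List.count_eq_zero]
        simpa [PySem.List.mem_dedup] using hc
      rw [h0]
      simp [hc]

theorem pv_get?_eq_some_one_iff (d : PySem.Dict Char Int) (c : Char) :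
    (d.get? c == some 1) = true ↔ d.getD c 0 = 1 := by
  cases h : d.get? c with
  | none => simp [PySem.Dict.getD_of_get?_eq_none _ _ h]
  | some v => simp [PySem.Dict.getD_of_get?_eq_some _ _ h]

-- a Nodup list whose members all equal w, with w a member, is [w]
theorem pv_nodup_all_eq (l : List String) (w : String) (hnd : l.Nodup)
    (hall : ∀ x ∈ l, x = w) (hw : w ∈ l) : l = [w] := by
  cases l with
  | nil => cases hw
  | cons a t =>
    have ha : a = w := hall a (List.mem_cons_self)
    cases t with
    | nil => simp [ha]
    | cons b t' =>
      have hb : b = w := hall b (by simp)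
      simp [ha, hb] at hnd

theorem pv_unique_iff_countP (ws : List String) (w : String) (c : Char)
    (hw : w ∈ ws) (hc : c ∈ w.toList) :
    (∀ v ∈ ws, v ≠ w → c ∉ v.toList) ↔
      (PySem.List.dedup ws).countP (fun v => decide (c ∈ v.toList)) = 1 := by
  rw [List.countP_eq_length_filter]
  constructor
  · intro h
    have heq : (PySem.List.dedup ws).filter (fun v => decide (c ∈ v.toList)) = [w] := by
      apply pv_nodup_all_eq
      · exact List.Nodup.filter _ (PySem.List.nodup_dedup _)
      · intro x hx
        obtain ⟨hxd, hxc⟩ := List.mem_filter.mp hx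
        by_contra hne
        exact h x ((PySem.List.mem_dedup _ _).mp hxd) hne (by simpa using hxc)
      · exact List.mem_filter.mpr ⟨(PySem.List.mem_dedup _ _).mpr hw, by simpa using hc⟩
    rw [heq]; rfl
  · intro h v hv hne hcv
    have hwf : w ∈ (PySem.List.dedup ws).filter (fun v => decide (c ∈ v.toList)) :=
      List.mem_filter.mpr ⟨(PySem.List.mem_dedup _ _).mpr hw, by simpa using hc⟩
    have hvf : v ∈ (PySem.List.dedup ws).filter (fun v => decide (c ∈ v.toList)) :=
      List.mem_filter.mpr ⟨(PySem.List.mem_dedup _ _).mpr hv, by simpa using hcv⟩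
    obtain ⟨x, hx⟩ := List.length_eq_one_iff.mp h
    rw [hx] at hwf hvf
    simp at hwf hvf
    exact hne (hvf.trans hwf.symm)

theorem pv_ready_eq (ws : List String) (w : String) (hw : w ∈ ws) :
    pvReadyA ws w = pvReadyB (pvCounts ws) w := by
  rw [Bool.eq_iff_iff, pv_readyA_iff]
  unfold pvReadyB pvCounts
  rw [List.any_eq_true]
  constructor
  · rintro ⟨c, hc, h⟩
    refine ⟨c, (PySem.List.mem_dedup _ _).mpr hc, ?_⟩
    rw [pv_get?_eq_some_one_iff, pv_counts_getD]
    have hcnt := (pv_unique_iff_countP ws w c hw hc).mp h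
    simp only [PySem.List.dedup_eq_ofList] at hcnt ⊢
    simp [hcnt]
  · rintro ⟨c, hc, h⟩
    have hc' : c ∈ w.toList := (PySem.List.mem_dedup _ _).mp hc
    refine ⟨c, hc', ?_⟩
    rw [pv_get?_eq_some_one_iff, pv_counts_getD] at h
    simp only [PySem.Dict.getD_empty, PySem.List.dedup_eq_ofList] at h
    have h' : (PySem.List.dedup ws).countP (fun v => decide (c ∈ v.toList)) = 1 := by
      rw [PySem.List.dedup_eq_ofList]; omega
    exact (pv_unique_iff_countP ws w c hw hc').mpr h'

theorem pv_find?_congr_mem {α : Type} (l : List α) (p q : α → Bool)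
    (h : ∀ x ∈ l, p x = q x) : l.find? p = l.find? q := by
  induction l with
  | nil => rfl
  | cons x t ih =>
    have hx := h x (List.mem_cons_self)
    by_cases hp : p x = true
    · rw [List.find?_cons_of_pos hp, List.find?_cons_of_pos (hx ▸ hp)]
    · have hp' : p x = false := Bool.eq_false_iff.mpr hp
      rw [List.find?_cons_of_neg (by simp [hp']), List.find?_cons_of_neg (by simp [← hx, hp']),
        ih (fun y hy => h y (List.mem_cons_of_mem _ hy))]

-- shifting the start of enumerate shifts the found index
theorem pv_enum_find_shift {α : Type} (p : α → Bool) (t : List α) (s : Int) :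
    (PySem.List.enumerate t s).find? (fun r => p r.2)
      = ((PySem.List.enumerate t 0).find? (fun r => p r.2)).map (fun r => (r.1 + s, r.2)) := by
  induction t generalizing s with
  | nil => simp [PySem.List.enumerate_nil]
  | cons x t ih =>
    rw [PySem.List.enumerate_cons, PySem.List.enumerate_cons]
    by_cases hp : p x = true
    · rw [List.find?_cons_of_pos (by simpa using hp), List.find?_cons_of_pos (by simpa using hp)]
      simp
    · have hp' : p x = false := Bool.eq_false_iff.mpr hp
      rw [List.find?_cons_of_neg (by simp [hp']), List.find?_cons_of_neg (by simp [hp']),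
        ih (s + 1), ih (0 + 1), Option.map_map]
      cases h0 : (PySem.List.enumerate t 0).find? (fun r => p r.2) with
      | none => simp
      | some r =>
        simp only [Option.map_some, Function.comp, Option.some.injEq, Prod.mk.injEq]
        exact ⟨by ring, trivial⟩

-- found indices of enumerate-from-0 are non-negative
theorem pv_enum_find_nonneg {α : Type} (p : α → Bool) (t : List α) (r : Int × α)
    (h : (PySem.List.enumerate t 0).find? (fun q => p q.2) = some r) : 0 ≤ r.1 := by
  have hm := List.mem_of_find?_eq_some h
  rw [PySem.List.mem_enumerate_iff] at hm
  obtain ⟨k, hk, rfl⟩ := hm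
  simp

-- B's scan-and-delete agrees with A's scan-and-remove, for any predicate
theorem pv_enum_find_erase (p : String → Bool) (ws : List String) :
    ((PySem.List.enumerate ws 0).find? (fun r => p r.2)).map
        (fun r => (r.2, ws.eraseIdx r.1.toNat))
      = (ws.find? p).map (fun w => (w, ws.erase w)) := by
  induction ws with
  | nil => simp [PySem.List.enumerate_nil]
  | cons x t ih =>
    rw [PySem.List.enumerate_cons]
    by_cases hp : p x = true
    · rw [List.find?_cons_of_pos (by simpa using hp), List.find?_cons_of_pos hp]
      simp [List.erase_cons_head]
    · have hp' : p x = false := Bool.eq_false_iff.mpr hp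
      rw [List.find?_cons_of_neg (by simp [hp']), List.find?_cons_of_neg (by simp [hp']),
        pv_enum_find_shift, Option.map_map]
      cases h0 : (PySem.List.enumerate t 0).find? (fun r => p r.2) with
      | none =>
        have ht : t.find? p = none := by
          cases ht : t.find? p with
          | none => rfl
          | some w => rw [h0] at ih; simp [ht] at ih
        simp [ht]
      | some r =>
        have hnn := pv_enum_find_nonneg p t r h0
        rw [h0] at ih
        cases ht : t.find? p with
        | none => simp [ht] at ih
        | some w =>
          rw [ht] at ih
          have hw : p w = true := (List.find?_eq_some_iff_append.mp ht).1
          have hxw : ¬(x == w) = true := by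
            simp only [beq_iff_eq]
            rintro rfl; rw [hw] at hp'; cases hp'
          have htn : (r.1 + (0 + 1)).toNat = r.1.toNat + 1 := by omega
          simp only [Option.map_some, Function.comp, Option.some.injEq, Prod.mk.injEq] at ih ⊢
          rw [htn, List.eraseIdx_cons_succ, List.erase_cons_tail hxw]
          exact ⟨ih.1, by rw [ih.2]⟩

-- one round of A = one round of B, packaged as (yielded word, new remaining list)
theorem pv_step_eq (ws : List String) :
    ((PySem.List.enumerate ws 0).find? (fun p => pvReadyB (pvCounts ws) p.2)).map
        (fun r => (r.2, ws.eraseIdx r.1.toNat))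
      = (ws.find? (pvReadyA ws)).map (fun w => (w, ws.erase w)) := by
  rw [pv_enum_find_erase, pv_find?_congr_mem ws _ _ (fun w hw => (pv_ready_eq ws w hw).symm)]

theorem pv_loop_eq (fuel : Nat) (ws : List String) : pvLoopA fuel ws = pvLoopB fuel ws := by
  induction fuel generalizing ws with
  | zero => rfl
  | succ n ih =>
    rw [pvLoopA, pvLoopB]
    cases he : ws.isEmpty with
    | true => simp
    | false =>
      simp only [Bool.false_eq_true, if_false]
      have hstep := pv_step_eq ws
      cases ha : ws.find? (pvReadyA ws) with
      | none =>
        rw [ha, Option.map_none] at hstep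
        cases hb : (PySem.List.enumerate ws 0).find? (fun p => pvReadyB (pvCounts ws) p.2) with
        | none => rfl
        | some r => rw [hb, Option.map_some] at hstep; cases hstep
      | some w =>
        have hmem : w ∈ ws := List.mem_of_find?_eq_some ha
        rw [ha, Option.map_some] at hstep
        cases hb : (PySem.List.enumerate ws 0).find? (fun p => pvReadyB (pvCounts ws) p.2) with
        | none => rw [hb, Option.map_none] at hstep; cases hstep
        | some r =>
          rw [hb, Option.map_some, Option.some.injEq] at hstep
          obtain ⟨r1, r2⟩ := r
          have h1 : r2 = w := congrArg Prod.fst hstep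
          have h2 : ws.eraseIdx r1.toNat = ws.erase w := congrArg Prod.snd hstep
          show (match PySem.List.remove? ws w with
                | some rest => w :: pvLoopA n rest
                | none => []) = r2 :: pvLoopB n (ws.eraseIdx r1.toNat)
          rw [PySem.List.remove?_eq_some_erase _ _ hmem, h2, h1]
          show w :: pvLoopA n (ws.erase w) = w :: pvLoopB n (ws.erase w)
          rw [ih]

-- ===== VERDICT (by name: the statement is the Claim_ definition above) =====
theorem gen_words_spec : Claim_equal_gen_words := by
  intro words _
  unfold Spec_gen_words gen_words gen_words_alt
  exact pv_loop_eq words.length words
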